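-- pv_equiv track=rewrite | github.com/oaqque/heart-to-unlock | server/collector/signal_processing.py | compute_integrals
-- ===== SOURCE A (Python) =====
-- def compute_integrals(heart_sets):
--     ivals = []
--     abs_ints = []
--     lengths = []
--     for h_set in heart_sets:
--         integral = 0
--         abs_integral = 0
--         i = 0
--         for val in h_set:
--             abs_integral += abs(val)
--             integral += val
--             i += 1
--         ivals.append(integral)
--         abs_ints.append(abs_integral)
--         lengths.append(i)
--     return [ivals, abs_ints, lengths]
-- ===== SOURCE B (Python) =====
-- def compute_integrals(heart_sets):
--     # No abs() anywhere: since |v| = v - 2*v for v < 0, the absolute sum of a row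
--     # equals (plain sum) - 2*(sum of its negative entries).
--     sums = [sum(h) for h in heart_sets]
--     negs = [sum(v for v in h if v < 0) for h in heart_sets]
--     abs_ints = [s - 2 * n for s, n in zip(sums, negs)]
--     lengths = [len(h) for h in heart_sets]
--     return [sums, abs_ints, lengths]
-- ===== Notes on version B (the rewrite author's own statement) =====
-- stated objective: alternative
-- what changed: Eliminates the abs() call and the fused per-row accumulator loop: B computes the absolute sum arithmetically as sum(h) - 2*sum(negative entries) (using |v| = v - 2v for v<0), assembling the three result lists in independent staged passes driven by the builtin sum.
import Mathlib
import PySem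

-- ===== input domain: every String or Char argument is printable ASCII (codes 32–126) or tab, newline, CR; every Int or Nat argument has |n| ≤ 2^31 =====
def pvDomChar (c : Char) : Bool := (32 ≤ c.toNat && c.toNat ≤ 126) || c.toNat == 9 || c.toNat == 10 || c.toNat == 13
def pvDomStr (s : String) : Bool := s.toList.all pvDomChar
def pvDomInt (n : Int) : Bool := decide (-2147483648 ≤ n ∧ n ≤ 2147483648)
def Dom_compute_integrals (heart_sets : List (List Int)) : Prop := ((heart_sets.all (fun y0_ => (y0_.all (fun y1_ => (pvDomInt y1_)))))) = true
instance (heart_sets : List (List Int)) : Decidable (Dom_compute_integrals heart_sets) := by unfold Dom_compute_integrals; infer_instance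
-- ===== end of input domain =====

-- B avoids abs() entirely: it derives each absolute sum arithmetically as sum(h) - 2*sum(negative entries), in staged passes (alternative).

-- ===== PORT A =====
-- A: one pass over heart_sets; for each set one inner pass maintaining (integral, abs_integral, i).
def compute_integrals (heart_sets : List (List Int)) : List (List Int) :=
  let st := heart_sets.foldl
    (fun (acc : List Int × List Int × List Int) h_set =>
      let r := h_set.foldl
        (fun (s : Int × Int × Int) val => (s.1 + val, s.2.1 + |val|, s.2.2 + 1))
        (0, 0, 0)
      (acc.1 ++ [r.1], acc.2.1 ++ [r.2.1], acc.2.2 ++ [r.2.2]))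
    ([], [], [])
  [st.1, st.2.1, st.2.2]

-- ===== PORT B =====
-- B: per-row sums, per-row negative-part sums, abs sums derived as s - 2*n, lengths.
def compute_integrals_alt (heart_sets : List (List Int)) : List (List Int) :=
  let sums := heart_sets.map (fun h => h.foldl (· + ·) 0)
  let negs := heart_sets.map (fun h => (h.filter (fun v => decide (v < 0))).foldl (· + ·) 0)
  let abs_ints := (sums.zip negs).map (fun p => p.1 - 2 * p.2)
  let lengths := heart_sets.map (fun h => (h.length : Int))
  [sums, abs_ints, lengths]

-- ===== PRECONDITION & SPEC =====
def Spec_compute_integrals (heart_sets : List (List Int)) (out : List (List Int)) : Prop := out = compute_integrals_alt heart_sets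
instance (heart_sets : List (List Int)) (out : List (List Int)) : Decidable (Spec_compute_integrals heart_sets out) := by unfold Spec_compute_integrals; infer_instance

-- ===== CLAIM (what is proved, stated in full; the proofs are below) =====
def Claim_equal_compute_integrals : Prop := ∀ (heart_sets : List (List Int)), Dom_compute_integrals heart_sets → Spec_compute_integrals heart_sets (compute_integrals heart_sets)

-- ===== LEMMAS AND PROOFS =====

theorem pv_shift_add (xs : List Int) (c : Int) :
    xs.foldl (· + ·) c = c + xs.foldl (· + ·) 0 := by
  induction xs generalizing c with
  | nil => simp
  | cons y ys ih => simp only [List.foldl_cons]; rw [ih, ih (0 + y)]; ring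

theorem pv_shift_abs (xs : List Int) (c : Int) :
    xs.foldl (fun a v => a + |v|) c = c + xs.foldl (fun a v => a + |v|) 0 := by
  induction xs generalizing c with
  | nil => simp
  | cons y ys ih => simp only [List.foldl_cons]; rw [ih, ih (0 + |y|)]; ring

-- A's inner accumulator loop computes (sum, abs-sum, length).
theorem pv_inner (h : List Int) (s : Int × Int × Int) :
    h.foldl (fun (s : Int × Int × Int) val => (s.1 + val, s.2.1 + |val|, s.2.2 + 1)) s
      = (s.1 + h.foldl (· + ·) 0, s.2.1 + h.foldl (fun a v => a + |v|) 0, s.2.2 + h.length) := by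
  induction h generalizing s with
  | nil => simp
  | cons x xs ih =>
    simp only [List.foldl_cons, ih]
    rw [pv_shift_add xs (0 + x), pv_shift_abs xs (0 + |x|)]
    refine Prod.ext ?_ (Prod.ext ?_ ?_) <;> simp <;> push_cast <;> ring

-- The abs-sum equals plain sum minus twice the sum of the negative entries.
theorem pv_abs_eq (h : List Int) :
    h.foldl (fun a v => a + |v|) 0
      = h.foldl (· + ·) 0 - 2 * (h.filter (fun v => decide (v < 0))).foldl (· + ·) 0 := by
  induction h with
  | nil => simp
  | cons x xs ih =>
    simp only [List.foldl_cons, List.filter_cons]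
    rw [pv_shift_abs xs (0 + |x|), pv_shift_add xs (0 + x), ih]
    by_cases hx : x < 0
    · simp only [hx, decide_true, if_true, List.foldl_cons]
      rw [pv_shift_add (xs.filter _) (0 + x)]
      have : |x| = -x := abs_of_neg hx
      rw [this]; ring
    · simp only [hx, decide_false, Bool.false_eq_true, if_false]
      have : |x| = x := abs_of_nonneg (le_of_not_gt hx)
      rw [this]; ring

theorem pv_outer (hs : List (List Int)) (acc : List Int × List Int × List Int) :
    hs.foldl
      (fun (acc : List Int × List Int × List Int) h_set =>
        let r := h_set.foldl
          (fun (s : Int × Int × Int) val => (s.1 + val, s.2.1 + |val|, s.2.2 + 1))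
          (0, 0, 0)
        (acc.1 ++ [r.1], acc.2.1 ++ [r.2.1], acc.2.2 ++ [r.2.2]))
      acc
    = (acc.1 ++ hs.map (fun h => h.foldl (· + ·) 0),
       acc.2.1 ++ hs.map (fun h => h.foldl (fun a v => a + |v|) 0),
       acc.2.2 ++ hs.map (fun h => (h.length : Int))) := by
  induction hs generalizing acc with
  | nil => simp
  | cons h hs ih =>
    simp only [List.foldl_cons]
    rw [ih]
    simp only [pv_inner]
    simp

-- B's zip-of-maps column equals the abs-sum column.
theorem pv_zip_col (hs : List (List Int)) :
    ((hs.map (fun h => h.foldl (· + ·) 0)).zip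
      (hs.map (fun h => (h.filter (fun v => decide (v < 0))).foldl (· + ·) 0))).map
        (fun p => p.1 - 2 * p.2)
    = hs.map (fun h => h.foldl (fun a v => a + |v|) 0) := by
  induction hs with
  | nil => simp
  | cons h hs ih =>
    simp only [List.map_cons, List.zip_cons_cons]
    rw [ih, pv_abs_eq h]

-- ===== VERDICT (by name: the statement is the Claim_ definition above) =====
theorem compute_integrals_spec : Claim_equal_compute_integrals := by
  intro hs _
  show _ = _
  simp only [compute_integrals, compute_integrals_alt]
  rw [pv_outer, pv_zip_col]
  simp
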